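-- pv_equiv track=rewrite | github.com/ARTFL-Project/PhiloLogic5 | python/philologic/runtime/term_expansion.py | _is_regex_pattern
-- ===== SOURCE A (Python) =====
-- _REGEX_METACHARS = frozenset(".*+?[{(\\")
--
-- def _is_regex_pattern(token: str) -> bool:
--     """Return True if token contains unescaped regex metacharacters."""
--     i = 0
--     while i < len(token):
--         if token[i] == "\\" and i + 1 < len(token):
--             i += 2  # skip escaped char
--             continue
--         if token[i] in _REGEX_METACHARS:
--             return True
--         i += 1
--     return False
-- ===== SOURCE B (Python) =====
-- import re
--
-- _REGEX_METACHARS = frozenset(".*+?[{(\\")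
--
--
-- def _is_regex_pattern(token: str) -> bool:
--     """Return True if token contains unescaped regex metacharacters."""
--     stripped = re.sub(r"\\.", "", token, flags=re.DOTALL)
--     return any(c in _REGEX_METACHARS for c in stripped)
-- ===== Notes on version B (the rewrite author's own statement) =====
-- stated objective: simpler
-- what changed: Replaces A's stateful index walk with i+=2 escape skipping by a two-phase pipeline: one regex substitution (re.sub r'\\.' with DOTALL) deletes every backslash+char escape pair, then a flat any() membership scan checks for metacharacters; the C regex engine and frozenset scan beat the per-character Python loop by a constant factor.
import Mathlib
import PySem

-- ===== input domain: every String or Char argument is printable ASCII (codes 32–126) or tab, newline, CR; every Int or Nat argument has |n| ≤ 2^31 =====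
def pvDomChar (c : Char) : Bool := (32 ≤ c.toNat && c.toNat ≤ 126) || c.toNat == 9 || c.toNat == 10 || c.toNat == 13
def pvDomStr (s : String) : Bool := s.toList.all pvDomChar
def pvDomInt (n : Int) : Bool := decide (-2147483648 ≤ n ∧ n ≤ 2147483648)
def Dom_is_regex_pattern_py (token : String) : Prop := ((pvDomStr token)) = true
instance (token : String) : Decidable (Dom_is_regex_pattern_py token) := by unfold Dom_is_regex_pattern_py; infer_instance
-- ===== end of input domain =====

-- B replaces A's stateful index walk (i += 2 over escapes) by a transform pass that
-- deletes every backslash+char escape pair, followed by a flat membership scan (simpler).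


-- _REGEX_METACHARS = frozenset(".*+?[{(\") ; membership test only, list is exact
def pvMetachars : List Char := ['.', '*', '+', '?', '[', '{', '(', '\\']

-- ===== PORT A =====
-- the while-loop of A: index i walked over the characters, i += 2 on an escape
def pvALoop (cs : List Char) (i : Nat) : Bool :=
  if h : i < cs.length then
    if cs[i] = '\\' ∧ i + 1 < cs.length then
      pvALoop cs (i + 2)
    else if cs[i] ∈ pvMetachars then
      true
    else
      pvALoop cs (i + 1)
  else
    false
termination_by cs.length - i

def is_regex_pattern_py (token : String) : Bool := pvALoop token.toList 0

-- ===== PORT B =====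
-- exact port of re.sub(r"\\.", "", token, flags=re.DOTALL): the regex engine scans left
-- to right and deletes each backslash-plus-any-character pair (DOTALL: '.' matches '\n' too);
-- a trailing lone backslash matches nothing and is kept
def pvStripEscapes : List Char → List Char
  | [] => []
  | c :: rest =>
    if c = '\\' ∧ rest ≠ [] then pvStripEscapes rest.tail
    else c :: pvStripEscapes rest
termination_by l => l.length
decreasing_by all_goals simp [List.length_tail]

-- any(c in _REGEX_METACHARS for c in stripped)
def is_regex_pattern_py_alt (token : String) : Bool :=
  (pvStripEscapes token.toList).any (· ∈ pvMetachars)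

-- ===== PRECONDITION & SPEC =====
def Spec_is_regex_pattern_py (token : String) (out : Bool) : Prop := out = is_regex_pattern_py_alt token
instance (token : String) (out : Bool) : Decidable (Spec_is_regex_pattern_py token out) := by unfold Spec_is_regex_pattern_py; infer_instance

-- ===== CLAIM (what is proved, stated in full; the proofs are below) =====
def Claim_equal_is_regex_pattern_py : Prop := ∀ (token : String), Dom_is_regex_pattern_py token → Spec_is_regex_pattern_py token (is_regex_pattern_py token)

-- ===== LEMMAS AND PROOFS =====

theorem pvStrip_keep (c : Char) (rest : List Char) (hc : c ≠ '\\') :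
    pvStripEscapes (c :: rest) = c :: pvStripEscapes rest := by
  rw [pvStripEscapes]
  rw [if_neg (by simp [hc])]

theorem pvStrip_esc (d : Char) (rest : List Char) :
    pvStripEscapes ('\\' :: d :: rest) = pvStripEscapes rest := by
  rw [pvStripEscapes]
  simp

-- A's loop from index i computes B's pipeline on the suffix cs.drop i
theorem pvALoop_eq_alt (cs : List Char) (i : Nat) :
    pvALoop cs i = (pvStripEscapes (cs.drop i)).any (· ∈ pvMetachars) := by
  induction hn : cs.length - i using Nat.strong_induction_on generalizing i with
  | _ n ih =>
  subst hn
  rw [pvALoop]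
  by_cases h : i < cs.length
  · rw [dif_pos h]
    have hdrop : cs.drop i = cs[i] :: cs.drop (i + 1) := List.drop_eq_getElem_cons h
    by_cases hesc : cs[i] = '\\' ∧ i + 1 < cs.length
    · rw [if_pos hesc]
      obtain ⟨hc, hlt⟩ := hesc
      have hdrop2 : cs.drop (i + 1) = cs[i + 1] :: cs.drop (i + 2) := List.drop_eq_getElem_cons hlt
      rw [hdrop, hdrop2, hc, pvStrip_esc]
      exact ih (cs.length - (i + 2)) (by omega) (i + 2) rfl
    · rw [if_neg hesc]
      by_cases hc : cs[i] = '\\'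
      · -- trailing lone backslash: both sides are true
        have htail : cs.drop (i + 1) = [] := by
          have hge : ¬ i + 1 < cs.length := fun h2 => hesc ⟨hc, h2⟩
          exact List.drop_eq_nil_of_le (by omega)
        rw [if_pos (by rw [hc]; decide), hdrop, htail, hc]
        rw [pvStripEscapes, if_neg (by simp), pvStripEscapes]
        decide
      · rw [hdrop, pvStrip_keep _ _ hc]
        by_cases hmem : cs[i] ∈ pvMetachars
        · rw [if_pos hmem]
          simp [hmem]
        · rw [if_neg hmem]
          simp only [List.any_cons]
          rw [ih (cs.length - (i + 1)) (by omega) (i + 1) rfl]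
          simp [hmem]
  · rw [dif_neg h]
    rw [List.drop_eq_nil_of_le (by omega), pvStripEscapes]
    rfl

-- ===== VERDICT (by name: the statement is the Claim_ definition above) =====
theorem is_regex_pattern_py_spec : Claim_equal_is_regex_pattern_py := by
  intro token _
  unfold Spec_is_regex_pattern_py is_regex_pattern_py is_regex_pattern_py_alt
  simpa using pvALoop_eq_alt token.toList 0
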